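-- pv_equiv track=rewrite | github.com/penincillin/Algorithm | leetcode/problems/3675_min_operations_to_transform_string.py | solve
-- ===== SOURCE A (Python) =====
-- def solve(s: str) -> int:
--     # remove duplicate, sort, and remove leading a
--     chars = sorted(list(set(s)))
--     # if chars[0] == "a":
--         # chars = chars[1:]
--     res = 0
--
--     n = len(chars)
--     for i in range(n - 1):
--         if chars[i] != "a":
--             c0 = chars[i]
--             c1 = chars[i+1]
--             res += (ord(c1) - ord(c0)) % 26
--
--     # last one
--     c = chars[-1]
--     res += (ord("a") - ord(c)) % 26
--     return res
-- ===== SOURCE B (Python) =====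
-- def solve(s: str) -> int:
--     # For each distinct char, find its successor by a direct min-query over the
--     # presence set (no sorting, no adjacent-pair scan).
--     present = set(s)
--     hi = max(present)
--     res = (ord("a") - ord(hi)) % 26
--     for c in present:
--         if c != "a" and c != hi:
--             nxt = min(d for d in present if d > c)
--             res += (ord(nxt) - ord(c)) % 26
--     return res
-- ===== Notes on version B (the rewrite author's own statement) =====
-- stated objective: alternative
-- what changed: Replaces A's sort of the distinct characters followed by an adjacent-index-pair loop with an unordered pass over the presence set that finds each character's successor by a direct min-query (min of the present characters greater than it) and the wrap term from a max-query; no sorting and no positional indexing.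
-- outside the precondition, e.g. on solve(''): A raises IndexError, B raises ValueError
import Mathlib
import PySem

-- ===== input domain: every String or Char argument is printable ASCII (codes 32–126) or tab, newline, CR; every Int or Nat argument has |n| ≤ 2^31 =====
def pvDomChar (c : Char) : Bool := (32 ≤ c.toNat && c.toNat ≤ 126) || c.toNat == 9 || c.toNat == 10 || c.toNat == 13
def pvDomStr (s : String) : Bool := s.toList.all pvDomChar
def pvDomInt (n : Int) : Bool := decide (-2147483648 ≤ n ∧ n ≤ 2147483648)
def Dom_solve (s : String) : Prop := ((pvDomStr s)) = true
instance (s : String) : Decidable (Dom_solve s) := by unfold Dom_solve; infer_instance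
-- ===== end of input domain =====

-- B replaces A's sort + adjacent-pair loop by an unordered pass over the presence set with
-- per-character successor min-queries and a max-query (objective: alternative algorithm).


-- ===== PORT A =====
def solve (s : String) : Int :=
  let chars := PySem.List.sorted (PySem.Set.ofList s.toList) (fun c => c) false
  let res : Int :=
    (PySem.List.pyRange 0 ((chars.length : Int) - 1) 1).foldl (fun res i =>
      if PySem.List.pyGetD chars i ' ' ≠ 'a' then
        res + PySem.Int.mod (((PySem.List.pyGetD chars (i + 1) ' ').toNat : Int)
              - ((PySem.List.pyGetD chars i ' ').toNat : Int)) 26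
      else res) 0
  match PySem.List.pyGet? chars (-1) with
  | none => 0  -- Python raises IndexError here; excluded by Pre_solve
  | some c => res + PySem.Int.mod (97 - (c.toNat : Int)) 26

-- ===== PORT B =====
def solve_alt (s : String) : Int :=
  let present := PySem.Set.ofList s.toList
  match PySem.List.max? present (fun c => c) with
  | none => 0  -- Python raises ValueError here (max of empty set); excluded by Pre_solve
  | some hi =>
    present.foldl (fun res c =>
      if c ≠ 'a' ∧ c ≠ hi then
        match PySem.List.min? (present.filter (fun d => decide (c < d))) (fun d => d) with
        | some nxt => res + PySem.Int.mod ((nxt.toNat : Int) - (c.toNat : Int)) 26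
        | none => res  -- unreachable: c ≠ hi guarantees a strictly greater present char
      else res)
      (PySem.Int.mod (97 - (hi.toNat : Int)) 26)

-- ===== PRECONDITION & SPEC =====
-- Pre_ excludes only the empty string, on which A raises IndexError (and B raises ValueError).
def Pre_solve (s : String) : Prop := s.toList ≠ []
instance (s : String) : Decidable (Pre_solve s) := by unfold Pre_solve; infer_instance
def pvWitness_solve : String := "abc"
def Spec_solve (s : String) (out : Int) : Prop := out = solve_alt s
instance (s : String) (out : Int) : Decidable (Spec_solve s out) := by unfold Spec_solve; infer_instance

-- ===== CLAIM (what is proved, stated in full; the proofs are below) =====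
def Claim_equal_solve : Prop := ∀ (s : String), Dom_solve s → Pre_solve s → Spec_solve s (solve s)

-- ===== LEMMAS AND PROOFS =====

-- the sum of adjacent mod-26 gaps along p :: t (skipping terms whose left end is 'a')
def pairSum : Char → List Char → Int
  | _, [] => 0
  | p, c :: t => (if p ≠ 'a' then PySem.Int.mod ((c.toNat : Int) - (p.toNat : Int)) 26 else 0) + pairSum c t

-- A's indexed pair loop over a :: t equals pairSum a t
theorem aloop_eq (t : List Char) : ∀ (a : Char) (r : Int),
    (List.range t.length).foldl (fun res i =>
      if (a :: t).getD i ' ' ≠ 'a' then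
        res + PySem.Int.mod ((((a :: t).getD (i + 1) ' ').toNat : Int)
              - (((a :: t).getD i ' ').toNat : Int)) 26
      else res) r
    = r + pairSum a t := by
  induction t with
  | nil => intro a r; simp [pairSum]
  | cons b t ih =>
    intro a r
    simp only [List.length_cons, List.range_succ_eq_map, List.foldl_cons, List.foldl_map]
    show List.foldl (fun res i =>
      if (b :: t).getD i ' ' ≠ 'a' then
        res + PySem.Int.mod ((((b :: t).getD (i + 1) ' ').toNat : Int)
              - (((b :: t).getD i ' ').toNat : Int)) 26
      else res)
      (if a ≠ 'a' then r + PySem.Int.mod ((b.toNat : Int) - (a.toNat : Int)) 26 else r)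
      (List.range t.length) = _
    rw [ih b]
    simp only [pairSum]
    by_cases ha : a = 'a'
    · subst ha; simp
    · simp only [ha, if_pos, ne_eq, not_false_eq_true]
      ring

-- A's pyRange/pyGetD loop cast down to the List.range/getD loop
theorem aloop_cast (l : List Char) (n : Nat) (r : Int) :
    (PySem.List.pyRange 0 (n : Int) 1).foldl (fun res i =>
      if PySem.List.pyGetD l i ' ' ≠ 'a' then
        res + PySem.Int.mod (((PySem.List.pyGetD l (i + 1) ' ').toNat : Int)
              - ((PySem.List.pyGetD l i ' ').toNat : Int)) 26
      else res) r
    = (List.range n).foldl (fun res i =>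
      if l.getD i ' ' ≠ 'a' then
        res + PySem.Int.mod (((l.getD (i + 1) ' ').toNat : Int)
              - ((l.getD i ' ').toNat : Int)) 26
      else res) r := by
  rw [PySem.List.pyRange_zero_natCast, List.foldl_map]
  refine List.foldl_ext _ _ _ ?_
  intro acc i _
  have h1 : ((i : Int) + 1) = ((i + 1 : Nat) : Int) := by push_cast; ring
  rw [h1, PySem.List.pyGetD_natCast, PySem.List.pyGetD_natCast]

-- the per-character contribution of B's loop body
def hTerm (P : List Char) (hi : Char) (c : Char) : Int :=
  if c ≠ 'a' ∧ c ≠ hi then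
    match PySem.List.min? (P.filter (fun d => decide (c < d))) (fun d => d) with
    | some nxt => PySem.Int.mod ((nxt.toNat : Int) - (c.toNat : Int)) 26
    | none => 0
  else 0

-- every element of a strictly increasing list is at most its last element
theorem le_getLast_of_pairwise (l : List Char) (hpw : l.Pairwise (· < ·)) (h : l ≠ []) :
    ∀ y ∈ l, y ≤ l.getLast h := by
  induction l with
  | nil => simp
  | cons a t ih =>
    intro y hy
    cases t with
    | nil =>
      simp only [List.mem_singleton] at hy
      simp [hy, List.getLast]
    | cons b t' =>
      have hpw' : (b :: t').Pairwise (· < ·) := (List.pairwise_cons.mp hpw).2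
      have hstep : ∀ x ∈ b :: t', a < x := (List.pairwise_cons.mp hpw).1
      rw [List.getLast_cons (by simp)]
      rcases List.mem_cons.mp hy with rfl | hy'
      · exact le_trans (hstep b (by simp)).le
          (ih hpw' (by simp) b (by simp))
      · exact ih hpw' (by simp) y hy'

-- B's successor min-query along a sorted decomposition: the filtered min is the next element
theorem min?_filter_succ (P K pre t : List Char) (c : Char)
    (hperm : K.Perm P) (hpw : K.Pairwise (· < ·)) (hK : K = pre ++ c :: t) :
    PySem.List.min? (P.filter (fun d => decide (c < d))) (fun d => d) = t.head? := by
  have hpermF : (K.filter (fun d => decide (c < d))).Perm (P.filter (fun d => decide (c < d))) :=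
    hperm.filter _
  have hKf : K.filter (fun d => decide (c < d)) = t := by
    subst hK
    rw [List.filter_append]
    have hpre : ∀ x ∈ pre, ¬ (c < x) := by
      intro x hx hcx
      have hxc : x < c := (List.pairwise_append.mp hpw).2.2 x hx c (by simp)
      exact absurd hcx (not_lt.mpr hxc.le)
    have h1 : pre.filter (fun d => decide (c < d)) = [] := by
      rw [List.filter_eq_nil_iff]
      intro x hx; simpa using hpre x hx
    have hct : ∀ x ∈ t, c < x := by
      intro x hx
      have hp2 := (List.pairwise_append.mp hpw).2.1
      exact (List.pairwise_cons.mp hp2).1 x hx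
    have h2 : (c :: t).filter (fun d => decide (c < d)) = t := by
      rw [List.filter_cons]
      simp only [lt_irrefl, decide_false]
      exact List.filter_eq_self.mpr (fun x hx => by simpa using hct x hx)
    rw [h1, h2, List.nil_append]
  cases ht : t with
  | nil =>
    have : P.filter (fun d => decide (c < d)) = [] := by
      have := hpermF; rw [hKf, ht] at this
      exact this.symm.eq_nil
    rw [this]; rfl
  | cons b t' =>
    have hpermP : (P.filter (fun d => decide (c < d))).Perm (b :: t') := by
      have := hpermF; rw [hKf, ht] at this; exact this.symm
    have hne : P.filter (fun d => decide (c < d)) ≠ [] := by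
      intro h; rw [h] at hpermP; exact absurd hpermP.symm.eq_nil (by simp)
    obtain ⟨m, hm⟩ := Option.ne_none_iff_exists'.mp
      (fun h => hne ((PySem.List.min?_eq_none_iff (P.filter (fun d => decide (c < d))) (fun d => d)).mp h))
    have hmem : m ∈ P.filter (fun d => decide (c < d)) := PySem.List.min?_mem hm
    have hmin : ∀ y ∈ P.filter (fun d => decide (c < d)), m ≤ y := PySem.List.min?_isMin hm
    -- b is minimal in b :: t' (pairwise < holds on t = b :: t' as a sublist of K)
    have hpwt : (b :: t').Pairwise (· < ·) := by
      have : t.Pairwise (· < ·) := by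
        subst hK
        have := (List.pairwise_append.mp hpw).2.1
        exact (List.pairwise_cons.mp this).2
      rwa [ht] at this
    have hb_min : ∀ y ∈ b :: t', b ≤ y := by
      intro y hy
      rcases List.mem_cons.mp hy with rfl | hy'
      · exact le_refl _
      · exact ((List.pairwise_cons.mp hpwt).1 y hy').le
    have hmb : m ≤ b := hmin b (hpermP.mem_iff.mpr (by simp))
    have hbm : b ≤ m := hb_min m (hpermP.mem_iff.mp hmem)
    rw [hm, List.head?_cons]
    exact congrArg some (le_antisymm hmb hbm)

-- the hTerm-sum over any sorted suffix c :: t of K telescopes to pairSum c t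
theorem sum_hTerm (P K : List Char) (hi : Char)
    (hperm : K.Perm P) (hpw : K.Pairwise (· < ·))
    (hhiK : hi ∈ K) (hmax : ∀ y ∈ K, y ≤ hi) :
    ∀ t pre c, K = pre ++ c :: t → ((c :: t).map (hTerm P hi)).sum = pairSum c t := by
  intro t
  induction t with
  | nil =>
    intro pre c hK
    have h1 : c ≤ hi := hmax c (by rw [hK]; simp)
    have h2 : hi ≤ c := by
      rw [hK] at hhiK
      rcases List.mem_append.mp hhiK with hp | hc
      · exact ((List.pairwise_append.mp (hK ▸ hpw)).2.2 hi hp c (by simp)).le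
      · simp only [List.mem_singleton] at hc; exact hc.le
    have hc : c = hi := le_antisymm h1 h2
    simp [hTerm, hc, pairSum]
  | cons b t' ih =>
    intro pre c hK
    have hmin := min?_filter_succ P K pre (b :: t') c hperm hpw hK
    have hcb : c < b := by
      have hp2 := (List.pairwise_append.mp (hK ▸ hpw)).2.1
      exact (List.pairwise_cons.mp hp2).1 b (by simp)
    have hchi : c ≠ hi := by
      have hbhi : b ≤ hi := hmax b (by rw [hK]; simp)
      exact ne_of_lt (lt_of_lt_of_le hcb hbhi)
    have hrest := ih (pre ++ [c]) b (by rw [hK]; simp)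
    simp only [List.map_cons, List.sum_cons] at hrest ⊢
    rw [hrest]
    simp only [hTerm, hmin, List.head?_cons, pairSum]
    by_cases hca : c = 'a' <;> simp [hca, hchi]

-- B's loop body is literally "add hTerm"
theorem bbody_eq (P : List Char) (hi : Char) :
    (fun (res : Int) (c : Char) =>
      if c ≠ 'a' ∧ c ≠ hi then
        match PySem.List.min? (P.filter (fun d => decide (c < d))) (fun d => d) with
        | some nxt => res + PySem.Int.mod ((nxt.toNat : Int) - (c.toNat : Int)) 26
        | none => res
      else res)
    = fun res c => res + hTerm P hi c := by
  funext res c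
  simp only [hTerm]
  split
  · cases PySem.List.min? (P.filter (fun d => decide (c < d))) (fun d => d) <;> simp
  · simp

-- hi = max?(P) is the last element of the sorted list K
theorem max?_eq_getLast (P K : List Char) (hperm : K.Perm P) (hpw : K.Pairwise (· < ·))
    (hKne : K ≠ []) (hi : Char)
    (hhi : PySem.List.max? P (fun c => c) = some hi) :
    K.getLast? = some hi := by
  have hLmax := le_getLast_of_pairwise K hpw hKne
  have hhimem : hi ∈ K := hperm.mem_iff.mpr (PySem.List.max?_mem hhi)
  have h1 : hi ≤ K.getLast hKne := hLmax hi hhimem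
  have h2 : K.getLast hKne ≤ hi :=
    PySem.List.max?_isMax hhi _ (hperm.mem_iff.mp (List.getLast_mem hKne))
  rw [List.getLast?_eq_some_getLast hKne]
  exact congrArg some (le_antisymm h2 h1)

-- ===== VERDICT (by name: the statement is the Claim_ definition above) =====
theorem solve_spec : Claim_equal_solve := by
  intro s _hd hpre
  unfold Spec_solve
  show solve s = solve_alt s
  simp only [solve, solve_alt]
  set P := PySem.Set.ofList s.toList with hP
  set K := PySem.List.sorted P (fun c => c) false with hKdef
  have hperm : K.Perm P := PySem.List.sorted_perm P (fun c => c) false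
  have hpw : K.Pairwise (· < ·) := PySem.List.sorted_ofList_pairwise_lt s.toList
  have hPne : P ≠ [] := by
    intro h
    cases hs : s.toList with
    | nil => exact hpre hs
    | cons x xs =>
      have : x ∈ P := (PySem.Set.mem_ofList s.toList x).mpr (by rw [hs]; simp)
      rw [h] at this; exact absurd this (by simp)
  have hKne : K ≠ [] := by
    intro h
    rw [h] at hperm
    exact hPne hperm.symm.eq_nil
  obtain ⟨c, t, hK⟩ := List.exists_cons_of_ne_nil hKne
  obtain ⟨hi, hhi⟩ : ∃ hi, PySem.List.max? P (fun c => c) = some hi := by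
    cases hm : PySem.List.max? P (fun c => c) with
    | none => exact absurd ((PySem.List.max?_eq_none_iff P (fun c => c)).mp hm) hPne
    | some hi => exact ⟨hi, rfl⟩
  have hlast : K.getLast? = some hi := max?_eq_getLast P K hperm hpw hKne hi hhi
  have hhiK : hi ∈ K := hperm.mem_iff.mpr (PySem.List.max?_mem hhi)
  have hmaxK : ∀ y ∈ K, y ≤ hi := fun y hy => PySem.List.max?_isMax hhi y (hperm.mem_iff.mp hy)
  rw [PySem.List.pyGet?_neg_one, hlast, hhi]
  show (List.foldl _ 0 _) + PySem.Int.mod (97 - (hi.toNat : Int)) 26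
      = List.foldl _ (PySem.Int.mod (97 - (hi.toNat : Int)) 26) P
  rw [bbody_eq P hi, PySem.List.foldl_add]
  have hsumPerm : (P.map (hTerm P hi)).sum = (K.map (hTerm P hi)).sum :=
    ((hperm.symm).map (hTerm P hi)).sum_eq
  rw [hsumPerm, hK]
  rw [sum_hTerm P K hi hperm hpw hhiK hmaxK t [] c (by simpa using hK)]
  have hlen : ((((c :: t) : List Char).length : Int) - 1) = ((t.length : Nat) : Int) := by
    simp
  rw [hlen, aloop_cast, aloop_eq t c 0]
  ring
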